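-- pv_equiv track=rewrite | github.com/kilataban/alx-higher_level_programming | 0x04-python-more_data_structures/10-best_score.py | best_score
-- ===== SOURCE A (Python) =====
-- def best_score(a_dictionary):
--     """return a key with the biggest integer value."""
--     if (type(a_dictionary) != dict) or len(a_dictionary) == 0:
--         return None
--
--     ret_val = list(a_dictionary.keys())[0]
--     big = a_dictionary[ret_val]
--     for k, v in a_dictionary.items():
--         if v > big:
--             big = v
--             ret_val = k
--     return (ret_val)
-- ===== SOURCE B (Python) =====
-- def best_score(a_dictionary):
--     """return a key with the biggest integer value."""
--     if (type(a_dictionary) != dict) or len(a_dictionary) == 0: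
--         return None
--     return sorted(a_dictionary.items(),
--                   key=lambda kv: kv[1], reverse=True)[0][0]
-- ===== Notes on version B (the rewrite author's own statement) =====
-- stated objective: alternative
-- what changed: Replaces the running-maximum scan with a sort-and-select: sort the items by value in descending order (Python's stable sort) and return the first entry's key; stability makes ties resolve to the first-inserted key exactly as A's strict '>' does.
import Mathlib
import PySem

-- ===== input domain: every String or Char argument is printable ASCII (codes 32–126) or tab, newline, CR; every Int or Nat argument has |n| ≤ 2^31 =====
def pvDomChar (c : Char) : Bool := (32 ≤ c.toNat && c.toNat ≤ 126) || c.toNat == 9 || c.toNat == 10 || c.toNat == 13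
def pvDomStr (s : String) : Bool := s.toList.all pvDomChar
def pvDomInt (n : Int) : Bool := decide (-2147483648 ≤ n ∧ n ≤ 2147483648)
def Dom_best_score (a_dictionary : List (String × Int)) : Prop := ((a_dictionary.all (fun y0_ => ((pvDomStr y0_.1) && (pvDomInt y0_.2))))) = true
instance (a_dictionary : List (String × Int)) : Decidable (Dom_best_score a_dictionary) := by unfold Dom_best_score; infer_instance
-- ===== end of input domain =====

-- B computes the answer by a stable descending sort on values and selecting the first key,
-- instead of A's running-maximum scan (objective: alternative decomposition, same result).

-- ===== PORT A =====
-- A: ret_val = first key, big = a_dictionary[ret_val] (first-match lookup = first value),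
-- then a scan over all items updating on strict '>'.
def best_score (a_dictionary : List (String × Int)) : Option String :=
  match a_dictionary with
  | [] => none
  | (k0, v0) :: _ =>
      some ((a_dictionary.foldl
        (fun (acc : String × Int) kv => if kv.2 > acc.2 then kv else acc)
        (k0, v0)).1)

-- ===== PORT B =====
def best_score_alt (a_dictionary : List (String × Int)) : Option String :=
  match PySem.List.sorted a_dictionary (fun kv => kv.2) true with
  | [] => none
  | (k, _) :: _ => some k

-- ===== PRECONDITION & SPEC =====
def Spec_best_score (a_dictionary : List (String × Int)) (out : Option String) : Prop := out = best_score_alt a_dictionary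
instance (a_dictionary : List (String × Int)) (out : Option String) : Decidable (Spec_best_score a_dictionary out) := by unfold Spec_best_score; infer_instance

-- ===== CLAIM (what is proved, stated in full; the proofs are below) =====
def Claim_equal_best_score : Prop := ∀ (a_dictionary : List (String × Int)), Dom_best_score a_dictionary → Spec_best_score a_dictionary (best_score a_dictionary)

-- ===== LEMMAS AND PROOFS =====

-- head of the stable descending insertion sort fold = A's running strict-max fold
theorem head_foldl_insertBy (xs : List (String × Int)) (b : String × Int) (t : List (String × Int)) :
    (xs.foldl (fun acc x =>
        PySem.List.insertBy (fun a b => decide ((fun kv : String × Int => kv.2) b < (fun kv : String × Int => kv.2) a)) x acc)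
      (b :: t)).head? =
    some (xs.foldl (fun acc kv => if kv.2 > acc.2 then kv else acc) b) := by
  induction xs generalizing b t with
  | nil => rfl
  | cons x xs ih =>
      simp only [List.foldl_cons]
      by_cases h : b.2 < x.2
      · rw [show PySem.List.insertBy (fun a b => decide ((fun kv : String × Int => kv.2) b < (fun kv : String × Int => kv.2) a)) x (b :: t)
              = x :: b :: t by simp [PySem.List.insertBy, h]]
        rw [ih]
        simp [gt_iff_lt, h]
      · rw [show PySem.List.insertBy (fun a b => decide ((fun kv : String × Int => kv.2) b < (fun kv : String × Int => kv.2) a)) x (b :: t)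
              = b :: PySem.List.insertBy (fun a b => decide ((fun kv : String × Int => kv.2) b < (fun kv : String × Int => kv.2) a)) x t by
            simp [PySem.List.insertBy, h]]
        rw [ih]
        simp [gt_iff_lt, h]

-- ===== VERDICT (by name: the statement is the Claim_ definition above) =====
theorem best_score_spec : Claim_equal_best_score := by
  intro d _
  unfold Spec_best_score best_score best_score_alt
  match d with
  | [] => rfl
  | (k0, v0) :: rest =>
      have hs := PySem.List.sorted_rev_eq_foldl_insertBy ((k0, v0) :: rest) (fun kv : String × Int => kv.2)
      have hhead :
          (PySem.List.sorted ((k0, v0) :: rest) (fun kv : String × Int => kv.2) true).head? =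
          some (rest.foldl (fun acc kv => if kv.2 > acc.2 then kv else acc) (k0, v0)) := by
        rw [hs]
        simp only [List.foldl_cons]
        rw [show PySem.List.insertBy (fun a b => decide ((fun kv : String × Int => kv.2) b < (fun kv : String × Int => kv.2) a)) (k0, v0) ([] : List (String × Int)) = [(k0, v0)] from rfl]
        exact head_foldl_insertBy rest (k0, v0) []
      have hA : ((k0, v0) :: rest).foldl (fun acc kv => if kv.2 > acc.2 then kv else acc) (k0, v0)
          = rest.foldl (fun acc kv => if kv.2 > acc.2 then kv else acc) (k0, v0) := by
        simp
      cases hm : PySem.List.sorted ((k0, v0) :: rest) (fun kv : String × Int => kv.2) true with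
      | nil => rw [hm] at hhead; simp at hhead
      | cons m t =>
          rw [hm] at hhead
          simp only [List.head?_cons, Option.some.injEq] at hhead
          simp only [hA, ← hhead]
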